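-- pv_equiv track=rewrite | github.com/Aditya-a404a/Codeforces-1 | D_Tung_Tung_Sahur.py | check
-- ===== SOURCE A (Python) =====
-- def check(p,s):
--     a = 0
--     b = 0
--
--     while a<len(p) and b<len(s):
--
--         if p[a] == s[b]:
--             i = a
--             j = b
--             count = 0
--             while i < len(p) and p[i] == p[a] :
--                 count+=1
--                 i+=1
--             while j < len(s) and s[j] == s[b] :
--                 j+=1
--             if not ( count<=j-b<=count*2):
--                 return "NO"
--             a = i
--             b = j
--         else:
--             return "NO"
--
--     return "YES" if a == len(p) and b == len(s) else "NO"
-- ===== SOURCE B (Python) =====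
-- def _rle(t):
--     runs = []
--     i = 0
--     n = len(t)
--     while i < n:
--         j = i
--         while j < n and t[j] == t[i]:
--             j += 1
--         runs.append((t[i], j - i))
--         i = j
--     return runs
--
--
-- def check(p, s):
--     rp = _rle(p)
--     rs = _rle(s)
--     if len(rp) != len(rs):
--         return "NO"
--     for (cp, kp), (cs, ks) in zip(rp, rs):
--         if cp != cs or not (kp <= ks <= 2 * kp):
--             return "NO"
--     return "YES"
-- ===== Notes on version B (the rewrite author's own statement) =====
-- stated objective: simpler
-- what changed: Replaces A's interleaved two-pointer scan (which re-counts runs of both strings inside the comparison loop) by a clean decomposition: run-length encode each string once, then compare the two run lists by length and a zipped per-run check char_p == char_s and k_p <= k_s <= 2*k_p.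
import Mathlib
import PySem

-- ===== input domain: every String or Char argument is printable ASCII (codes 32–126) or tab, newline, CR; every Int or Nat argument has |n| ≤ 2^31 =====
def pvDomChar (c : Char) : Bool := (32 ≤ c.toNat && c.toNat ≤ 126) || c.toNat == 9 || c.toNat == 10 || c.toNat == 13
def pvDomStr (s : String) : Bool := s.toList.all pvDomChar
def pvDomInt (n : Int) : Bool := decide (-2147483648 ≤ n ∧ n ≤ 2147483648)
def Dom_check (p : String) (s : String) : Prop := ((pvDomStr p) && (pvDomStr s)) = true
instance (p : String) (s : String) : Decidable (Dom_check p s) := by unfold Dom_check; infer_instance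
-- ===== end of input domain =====

-- B replaces A's interleaved two-pointer run scan by a decomposition: run-length
-- encode each string once, then compare the run lists (objective: simpler).

-- ===== PORT A =====
-- inner 'while i < len(p) and p[i] == p[a]' loop, counting from the element AFTER position a
def runA (c : Char) : List Char → Nat
  | [] => 0
  | x :: xs => if x == c then runA c xs + 1 else 0

-- the outer 'while a < len(p) and b < len(s)' loop, on the suffixes p[a:], s[b:]
def loopA : List Char → List Char → String
  | [], [] => "YES"           -- a == len(p) and b == len(s)
  | [], _ :: _ => "NO"
  | _ :: _, [] => "NO"
  | x :: xs, y :: ys =>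
    if x == y then
      let count := runA x xs + 1
      let d := runA y ys + 1        -- j - b
      if count ≤ d ∧ d ≤ count * 2 then
        loopA (xs.drop (runA x xs)) (ys.drop (runA y ys))
      else "NO"
    else "NO"
termination_by l1 _ => l1.length
decreasing_by simp [List.length_drop]

def check (p : String) (s : String) : String := loopA p.toList s.toList

-- ===== PORT B =====
-- _rle: scan off one maximal run at a time (the inner 'while j < n and t[j] == t[i]')
def rleB : List Char → List (Char × Nat)
  | [] => []
  | c :: r =>
    let run := r.takeWhile (· == c)
    (c, run.length + 1) :: rleB (r.drop run.length)
termination_by t => t.length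
decreasing_by simp [List.length_drop]

def check_alt (p : String) (s : String) : String :=
  let rp := rleB p.toList
  let rs := rleB s.toList
  if rp.length = rs.length then
    if (rp.zip rs).all (fun pr =>
        pr.1.1 == pr.2.1 && decide (pr.1.2 ≤ pr.2.2) && decide (pr.2.2 ≤ 2 * pr.1.2)) then
      "YES"
    else "NO"
  else "NO"

-- ===== PRECONDITION & SPEC =====
def Spec_check (p : String) (s : String) (out : String) : Prop := out = check_alt p s
instance (p : String) (s : String) (out : String) : Decidable (Spec_check p s out) := by unfold Spec_check; infer_instance

-- ===== CLAIM (what is proved, stated in full; the proofs are below) =====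
def Claim_equal_check : Prop := ∀ (p : String) (s : String), Dom_check p s → Spec_check p s (check p s)

-- ===== LEMMAS AND PROOFS =====

-- the body of check_alt, on lists
def altL (l1 l2 : List Char) : String :=
  if (rleB l1).length = (rleB l2).length then
    if ((rleB l1).zip (rleB l2)).all (fun pr =>
        pr.1.1 == pr.2.1 && decide (pr.1.2 ≤ pr.2.2) && decide (pr.2.2 ≤ 2 * pr.1.2)) then
      "YES"
    else "NO"
  else "NO"

theorem takeWhile_length_eq_runA (c : Char) (r : List Char) :
    (r.takeWhile (· == c)).length = runA c r := by
  induction r with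
  | nil => simp [runA]
  | cons x xs ih =>
    by_cases h : x == c
    · simp [List.takeWhile, h, runA, ih]
    · simp [List.takeWhile, h, runA]

theorem rleB_cons (c : Char) (r : List Char) :
    rleB (c :: r) = (c, runA c r + 1) :: rleB (r.drop (runA c r)) := by
  rw [rleB]
  simp [takeWhile_length_eq_runA]

theorem key (l1 l2 : List Char) : loopA l1 l2 = altL l1 l2 := by
  fun_induction loopA l1 l2 with
  | case1 => simp [altL, rleB]
  | case2 y ys => simp [altL, rleB, rleB_cons]
  | case3 x xs => simp [altL, rleB, rleB_cons]
  | case4 x xs y ys hxy cnt dd hle ih =>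
    -- matching heads and the run-length bound holds: both reduce to the tails
    have hle' : runA x xs + 1 ≤ runA y ys + 1 ∧ runA y ys + 1 ≤ (runA x xs + 1) * 2 := hle
    rw [ih]
    simp only [altL]
    rw [rleB_cons, rleB_cons]
    have h1 : decide (runA x xs + 1 ≤ runA y ys + 1) = true := by
      simp only [decide_eq_true_eq]; omega
    have h2 : decide (runA y ys + 1 ≤ 2 * (runA x xs + 1)) = true := by
      simp only [decide_eq_true_eq]; omega
    simp only [List.length_cons, Nat.add_right_cancel_iff, List.zip_cons_cons, List.all_cons]
    simp only [hxy, h1, h2, Bool.true_and]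
  | case5 x xs y ys hxy cnt dd hle =>
    -- heads match but the run-length bound fails: both sides say NO
    have hle' : ¬ (runA x xs + 1 ≤ runA y ys + 1 ∧ runA y ys + 1 ≤ (runA x xs + 1) * 2) := hle
    simp only [altL]
    rw [rleB_cons, rleB_cons]
    have hb : (x == y && decide (runA x xs + 1 ≤ runA y ys + 1)
        && decide (runA y ys + 1 ≤ 2 * (runA x xs + 1))) = false := by
      simp [hxy]
      omega
    simp only [List.zip_cons_cons, List.all_cons, hb, Bool.false_and]
    simp
  | case6 x xs y ys hxy =>
    -- heads differ: both sides say NO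
    have hb : (x == y) = false := by simpa using hxy
    simp only [altL]
    rw [rleB_cons, rleB_cons]
    simp only [List.zip_cons_cons, List.all_cons, hb, Bool.false_and]
    simp

-- ===== VERDICT (by name: the statement is the Claim_ definition above) =====
theorem check_spec : Claim_equal_check := by
  intro p s _
  unfold Spec_check check check_alt
  simpa [altL] using key p.toList s.toList
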